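-- pv_equiv track=rewrite | github.com/xushige/OCR-Layout-Produce | utils/generate_object.py | _draw_font_box
-- ===== SOURCE A (Python) =====
-- def _draw_font_box(image_size, font_size):
--     img_w, img_h = image_size
--     font_w, font_h = font_size
--     all_x = []
--     x = 0
--     all_x.append(x)
--     while x < img_w:
--         x = font_w + 50 + x  ####  隔50 画一次文字
--         all_x.append(x)
--
--     all_y = []
--     y = 0
--     all_y.append(y)
--     while y < img_h:
--         y = font_h + 50 + y  ####  隔50 画一次文字
--         all_y.append(y)
--     return all_x, all_y
-- ===== SOURCE B (Python) =====
-- def _draw_font_box(image_size, font_size):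
--     img_w, img_h = image_size
--     font_w, font_h = font_size
--
--     def axis(limit, step):
--         k = -(-limit // step) if limit > 0 else 0
--         return [i * step for i in range(k + 1)]
--
--     return axis(img_w, font_w + 50), axis(img_h, font_h + 50)
-- ===== Notes on version B (the rewrite author's own statement) =====
-- stated objective: simpler
-- what changed: Replaces the condition-driven while-accumulation with a closed-form count k = ceil(limit/step) per axis and a direct [i*step for i in range(k+1)] materialization.
import Mathlib
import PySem

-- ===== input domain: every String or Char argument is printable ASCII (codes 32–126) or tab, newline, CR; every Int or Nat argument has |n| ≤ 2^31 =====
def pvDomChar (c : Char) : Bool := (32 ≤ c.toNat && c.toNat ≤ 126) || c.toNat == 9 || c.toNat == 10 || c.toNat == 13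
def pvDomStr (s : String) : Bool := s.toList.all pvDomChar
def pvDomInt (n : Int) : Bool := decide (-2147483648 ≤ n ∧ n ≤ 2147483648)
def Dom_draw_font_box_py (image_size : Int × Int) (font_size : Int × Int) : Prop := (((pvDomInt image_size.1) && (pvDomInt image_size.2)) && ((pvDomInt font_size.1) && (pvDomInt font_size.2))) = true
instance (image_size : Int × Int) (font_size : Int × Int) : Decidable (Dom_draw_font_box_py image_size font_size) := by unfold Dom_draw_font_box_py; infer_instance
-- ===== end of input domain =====

-- Header: B replaces A's while-loops by a closed-form count k = ceil(limit/step) per axis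
-- and a direct map over range(k+1) — simpler, same asymptotic cost.

-- ===== PORT A =====
-- A's while loop: append x := fw + 50 + x while x < limit. The '0 < fw + 50' conjunct in the
-- guard is a totality guard only (where it fails and x < limit, the Python loop diverges;
-- Pre_ excludes those inputs).
def pvALoop_draw (limit fw x : Int) : List Int :=
  if h : x < limit ∧ 0 < fw + 50 then
    (fw + 50 + x) :: pvALoop_draw limit fw (fw + 50 + x)
  else []
termination_by (limit - x).toNat
decreasing_by omega

def draw_font_box_py (image_size : Int × Int) (font_size : Int × Int) : List Int × List Int :=
  let img_w := image_size.1; let img_h := image_size.2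
  let font_w := font_size.1; let font_h := font_size.2
  (0 :: pvALoop_draw img_w font_w 0, 0 :: pvALoop_draw img_h font_h 0)

-- ===== PORT B =====
def pvBAxis_draw (limit step : Int) : List Int :=
  let k : Int := if 0 < limit then -(PySem.Int.floordiv (-limit) step) else 0
  (PySem.List.pyRange 0 (k + 1) 1).map (fun i => i * step)

def draw_font_box_py_alt (image_size : Int × Int) (font_size : Int × Int) : List Int × List Int :=
  (pvBAxis_draw image_size.1 (font_size.1 + 50), pvBAxis_draw image_size.2 (font_size.2 + 50))

-- ===== PRECONDITION & SPEC =====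
-- Pre_ excludes exactly the inputs on which A never returns: a non-positive step
-- (font component + 50 ≤ 0) together with a positive image bound makes A's while loop diverge
-- (and makes B raise ZeroDivisionError when the step is 0).
def Pre_draw_font_box_py (image_size : Int × Int) (font_size : Int × Int) : Prop :=
  (0 < font_size.1 + 50 ∨ image_size.1 ≤ 0) ∧ (0 < font_size.2 + 50 ∨ image_size.2 ≤ 0)
instance (image_size : Int × Int) (font_size : Int × Int) : Decidable (Pre_draw_font_box_py image_size font_size) := by unfold Pre_draw_font_box_py; infer_instance

def pvWitness_draw_font_box_py : (Int × Int) × (Int × Int) := ((200, 150), (30, 40))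

def Spec_draw_font_box_py (image_size : Int × Int) (font_size : Int × Int) (out : List Int × List Int) : Prop := out = draw_font_box_py_alt image_size font_size
instance (image_size : Int × Int) (font_size : Int × Int) (out : List Int × List Int) : Decidable (Spec_draw_font_box_py image_size font_size out) := by unfold Spec_draw_font_box_py; infer_instance

-- ===== CLAIM (what is proved, stated in full; the proofs are below) =====
def Claim_equal_draw_font_box_py : Prop := ∀ (image_size : Int × Int) (font_size : Int × Int), Dom_draw_font_box_py image_size font_size → Pre_draw_font_box_py image_size font_size → Spec_draw_font_box_py image_size font_size (draw_font_box_py image_size font_size)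

-- ===== LEMMAS AND PROOFS =====

-- core: with positive step and (k-1)*step < limit ≤ k*step, the loop from m*step lists the
-- remaining multiples (m+1)*step, …, k*step.
theorem pvALoop_eq_map (limit fw : Int) (hstep : 0 < fw + 50)
    (k : Int) (hk1 : (k - 1) * (fw + 50) < limit) (hk2 : limit ≤ k * (fw + 50)) :
    ∀ (n : Nat) (m : Int), 0 ≤ m → m + (n : Int) = k →
      pvALoop_draw limit fw (m * (fw + 50)) =
        (PySem.List.pyRange (m + 1) (k + 1) 1).map (fun i => i * (fw + 50)) := by
  intro n
  induction n with
  | zero =>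
    intro m hm hmk
    have hmk' : m = k := by omega
    subst hmk'
    rw [pvALoop_draw]
    have hng : ¬ (m * (fw + 50) < limit ∧ 0 < fw + 50) := by
      intro ⟨h1, _⟩; omega
    rw [dif_neg hng]
    simp [PySem.List.pyRange]
  | succ n ih =>
    intro m hm hmk
    have hmltk : m < k := by omega
    have hle : m * (fw + 50) ≤ (k - 1) * (fw + 50) :=
      mul_le_mul_of_nonneg_right (by omega) (by omega)
    have hlt : m * (fw + 50) < limit := lt_of_le_of_lt hle hk1
    rw [pvALoop_draw, dif_pos ⟨hlt, hstep⟩]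
    have hx : fw + 50 + m * (fw + 50) = (m + 1) * (fw + 50) := by ring
    rw [hx, ih (m + 1) (by omega) (by omega),
        PySem.List.pyRange_one_cons (a := m + 1) (b := k + 1) (by omega)]
    simp

-- per-axis equality under the per-axis precondition
theorem axis_eq (limit fw : Int) (hpre : 0 < fw + 50 ∨ limit ≤ 0) :
    0 :: pvALoop_draw limit fw 0 = pvBAxis_draw limit (fw + 50) := by
  simp only [pvBAxis_draw]
  by_cases hlim : 0 < limit
  · have hstep : 0 < fw + 50 := by rcases hpre with h | h <;> omega
    rw [if_pos hlim]
    set k : Int := -(PySem.Int.floordiv (-limit) (fw + 50)) with hkdef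
    have hbr := (PySem.Int.neg_floordiv_neg_eq_iff_of_pos (a := limit) (b := fw + 50) (q := k) hstep).mp rfl
    have hk1 : (k - 1) * (fw + 50) < limit := hbr.1
    have hk2 : limit ≤ k * (fw + 50) := hbr.2
    have hkpos : 0 ≤ k := by
      by_contra h
      have : k * (fw + 50) ≤ 0 :=
        mul_nonpos_of_nonpos_of_nonneg (by omega) (by omega)
      omega
    have hmain := pvALoop_eq_map limit fw hstep k hk1 hk2 k.toNat 0 le_rfl (by omega)
    rw [zero_mul] at hmain
    rw [hmain, PySem.List.pyRange_one_cons (a := 0) (b := k + 1) (by omega)]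
    simp
  · rw [pvALoop_draw]
    have hng : ¬ ((0 : Int) < limit ∧ 0 < fw + 50) := by intro ⟨h, _⟩; exact hlim h
    rw [dif_neg hng]
    simp [if_neg hlim, PySem.List.pyRange]

-- ===== VERDICT (by name: the statement is the Claim_ definition above) =====
theorem draw_font_box_py_spec : Claim_equal_draw_font_box_py := by
  intro is fs _ hpre
  unfold Spec_draw_font_box_py draw_font_box_py draw_font_box_py_alt
  simp only
  rw [← axis_eq is.1 fs.1 (by rcases hpre.1 with h | h <;> [exact Or.inl h; exact Or.inr h]),
      ← axis_eq is.2 fs.2 (by rcases hpre.2 with h | h <;> [exact Or.inl h; exact Or.inr h])]
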